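-- pv_equiv track=rewrite | github.com/wdnnll21/allrecipes-nlp | tools.py | get_tools
-- ===== SOURCE A (Python) =====
-- tools = ["spoon", "spatula", "tongs", "whisk", "rolling pin", "food processor", "mixer", "scale", "pan", "skillet",
--          "pot", "colander", "strainer", "cutting board", "chef's knife", "pairing knife", "bread knife",
--          "measuring cups", "peeler", "honing steel", "grater", "ladle", "skimmer", "thermometer", "timer",
--          "zester", "chopper", "bowl", "can opener", "jar opener"]
--
-- def get_tools(steps):
--     used_tools = []
--     for step in steps:
--         tools_in_step = [tool if tool in step.lower() else None for tool in tools]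
--         if any(tools_in_step):
--             for tool in tools_in_step:
--                 if tool and tool not in used_tools:
--                     used_tools.append(tool)
--     return used_tools
-- ===== SOURCE B (Python) =====
-- tools = ["spoon", "spatula", "tongs", "whisk", "rolling pin", "food processor", "mixer", "scale", "pan", "skillet",
--          "pot", "colander", "strainer", "cutting board", "chef's knife", "pairing knife", "bread knife",
--          "measuring cups", "peeler", "honing steel", "grater", "ladle", "skimmer", "thermometer", "timer",
--          "zester", "chopper", "bowl", "can opener", "jar opener"]
--
-- def _first_match_index(tool, lowered):
--     # index of the first step mentioning the tool, or None
--     for si, s in enumerate(lowered):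
--         if tool in s:
--             return si
--     return None
--
-- def get_tools(steps):
--     # Tool-major scan: attach to each mentioned tool the combined rank
--     # (first step mentioning it, position in the tools list), then sort by rank.
--     lowered = [s.lower() for s in steps]
--     keyed = []
--     for ti, tool in enumerate(tools):
--         si = _first_match_index(tool, lowered)
--         if si is not None:
--             keyed.append((si * len(tools) + ti, tool))
--     keyed.sort(key=lambda kv: kv[0])
--     return [tool for _, tool in keyed]
-- ===== Notes on version B (the rewrite author's own statement) =====
-- stated objective: alternative
-- what changed: Replaces A's step-major dedup-while-appending loop with a tool-major algorithm: for each tool find the index of the first step mentioning it (stopping at the first hit), combine it with the tool's list position into a rank, then sort the mentioned tools by rank.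
import Mathlib
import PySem

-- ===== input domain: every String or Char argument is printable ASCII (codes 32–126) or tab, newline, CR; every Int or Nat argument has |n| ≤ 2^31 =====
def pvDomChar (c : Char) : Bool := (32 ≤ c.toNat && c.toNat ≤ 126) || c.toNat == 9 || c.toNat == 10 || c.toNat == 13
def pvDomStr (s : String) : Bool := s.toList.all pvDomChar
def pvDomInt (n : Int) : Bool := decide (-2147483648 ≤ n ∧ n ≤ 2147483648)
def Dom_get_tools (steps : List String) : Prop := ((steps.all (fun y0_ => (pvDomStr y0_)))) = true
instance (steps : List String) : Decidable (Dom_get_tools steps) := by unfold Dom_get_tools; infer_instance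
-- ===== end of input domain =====

-- B replaces A's step-major dedup-while-appending loop with a tool-major algorithm:
-- each mentioned tool gets the rank (first matching step, tool position), then sort by rank.


-- module-level constant 'tools' shared by both implementations
def pvToolsConst : List String :=
  ["spoon", "spatula", "tongs", "whisk", "rolling pin", "food processor", "mixer", "scale", "pan", "skillet",
   "pot", "colander", "strainer", "cutting board", "chef's knife", "pairing knife", "bread knife",
   "measuring cups", "peeler", "honing steel", "grater", "ladle", "skimmer", "thermometer", "timer",
   "zester", "chopper", "bowl", "can opener", "jar opener"]

-- ===== PORT A =====
def get_tools (steps : List String) : List String :=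
  steps.foldl
    (fun used_tools step =>
      let tools_in_step : List (Option String) :=
        pvToolsConst.map (fun tool =>
          if PySem.Str.isIn tool (PySem.Str.lower step) then some tool else none)
      if tools_in_step.any (fun o => match o with | some t => t ≠ "" | none => false) then
        tools_in_step.foldl
          (fun ut o =>
            match o with
            | some tool => if tool ≠ "" ∧ tool ∉ ut then ut ++ [tool] else ut
            | none => ut)
          used_tools
      else used_tools)
    []

-- ===== PORT B =====
-- helper _first_match_index: first index (from enumerate) whose string contains the tool
def pvFirstMatch (tool : String) : List (Int × String) → Option Int
  | [] => none
  | (si, s) :: rest => if PySem.Str.isIn tool s then some si else pvFirstMatch tool rest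

def get_tools_alt (steps : List String) : List String :=
  let lowered := steps.map PySem.Str.lower
  let keyed := (PySem.List.enumerate pvToolsConst).foldl
    (fun acc q =>
      match pvFirstMatch q.2 (PySem.List.enumerate lowered) with
      | some si => acc ++ [(si * PySem.List.len pvToolsConst + q.1, q.2)]
      | none => acc) []
  (PySem.List.sorted keyed (fun kv => kv.1) false).map (fun kv => kv.2)

-- ===== PRECONDITION & SPEC =====
def Spec_get_tools (steps : List String) (out : List String) : Prop := out = get_tools_alt steps
instance (steps : List String) (out : List String) : Decidable (Spec_get_tools steps out) := by unfold Spec_get_tools; infer_instance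

-- ===== CLAIM (what is proved, stated in full; the proofs are below) =====
def Claim_equal_get_tools : Prop := ∀ (steps : List String), Dom_get_tools steps → Spec_get_tools steps (get_tools steps)

-- ===== LEMMAS AND PROOFS =====

-- proof-side abbreviations (L is the list of lowered steps)
def pvFi (L : List String) (t : String) : Nat := L.findIdx (fun s => PySem.Str.isIn t s)

def pvP (L : List String) (t : String) : Bool := L.any (fun s => PySem.Str.isIn t s)

def pvKeyN (L : List String) (t : String) : Nat := pvFi L t * 30 + pvToolsConst.idxOf t

def pvKeyF (L : List String) (t : String) : Int × String :=
  ((pvFi L t : Int) * 30 + (pvToolsConst.idxOf t : Int), t)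

-- the canonical result: for k, k+1, …, the tools whose first match is exactly that step
def pvCanon (L : List String) : Nat → Nat → List String
  | 0, _ => []
  | n+1, k => pvToolsConst.filter (fun t => pvFi L t == k) ++ pvCanon L n (k+1)

theorem pvTools_nodup : pvToolsConst.Nodup := by decide

theorem pvTools_ne_empty : ∀ t ∈ pvToolsConst, t ≠ "" := by decide

theorem pvTools_len : pvToolsConst.length = 30 := rfl

-- ---- A side ----

-- A's inner append-with-dedup loop over the option list equals folding Set.add over the filter
theorem pv_inner_eq (p : String → Bool) (ts : List String) (h : ∀ t ∈ ts, t ≠ "")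
    (acc : List String) :
    (ts.map (fun t => if p t then some t else none)).foldl
      (fun ut o =>
        match o with
        | some tool => if tool ≠ "" ∧ tool ∉ ut then ut ++ [tool] else ut
        | none => ut)
      acc
    = (ts.filter p).foldl PySem.Set.add acc := by
  induction ts generalizing acc with
  | nil => rfl
  | cons t ts ih =>
    have ht : t ≠ "" := h t (List.mem_cons_self)
    have h' : ∀ u ∈ ts, u ≠ "" := fun u hu => h u (List.mem_cons_of_mem _ hu)
    by_cases hp : p t
    · simp only [List.map_cons, List.filter_cons, hp, if_pos, List.foldl_cons, ih h']
      congr 1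
      simp only [PySem.Set.add, PySem.Set.contains, ht, ne_eq, not_false_iff, true_and]
      by_cases hm : t ∈ acc <;> simp [hm]
    · simp only [List.map_cons, List.filter_cons, hp, List.foldl_cons, Bool.false_eq_true,
        ite_false]
      exact ih h' acc

-- A's whole per-step body (including the any() guard) equals folding Set.add over the matches
theorem pv_step_eq (step : String) (acc : List String) :
    (if (pvToolsConst.map (fun tool =>
          if PySem.Str.isIn tool (PySem.Str.lower step) then some tool else none)).any
        (fun o => match o with | some t => t ≠ "" | none => false) then
      (pvToolsConst.map (fun tool =>
          if PySem.Str.isIn tool (PySem.Str.lower step) then some tool else none)).foldl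
        (fun ut o =>
          match o with
          | some tool => if tool ≠ "" ∧ tool ∉ ut then ut ++ [tool] else ut
          | none => ut)
        acc
    else acc)
    = (pvToolsConst.filter
        (fun tool => PySem.Str.isIn tool (PySem.Str.lower step))).foldl PySem.Set.add acc := by
  by_cases hany : (pvToolsConst.map (fun tool =>
      if PySem.Str.isIn tool (PySem.Str.lower step) then some tool else none)).any
      (fun o => match o with | some t => t ≠ "" | none => false)
  · rw [if_pos hany]
    exact pv_inner_eq _ pvToolsConst pvTools_ne_empty acc
  · have hfil : pvToolsConst.filter
        (fun tool => PySem.Str.isIn tool (PySem.Str.lower step)) = [] := by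
      rw [List.filter_eq_nil_iff]
      intro t ht hpt
      apply hany
      simp only [List.any_eq_true, List.mem_map]
      exact ⟨some t, ⟨t, ht, by rw [if_pos hpt]⟩, by simpa using pvTools_ne_empty t ht⟩
    rw [if_neg hany, hfil]; rfl

-- A as a fold of Set.add-blocks over the lowered steps
theorem pv_A_fold (steps : List String) :
    get_tools steps
    = (steps.map PySem.Str.lower).foldl
        (fun a s => (pvToolsConst.filter (fun t => PySem.Str.isIn t s)).foldl PySem.Set.add a)
        [] := by
  unfold get_tools
  rw [List.foldl_map]
  exact PySem.List.foldl_congr_mem _ _ _ [] (fun a s _ => pv_step_eq s a)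

-- folding Set.add of a duplicate-free list appends exactly the not-yet-present elements
theorem pv_foldl_add_nodup (xs : List String) (acc : List String) (h : xs.Nodup) :
    xs.foldl PySem.Set.add acc = acc ++ xs.filter (fun t => !acc.contains t) := by
  induction xs generalizing acc with
  | nil => simp
  | cons x xs ih =>
    have hx : x ∉ xs := (List.nodup_cons.mp h).1
    have h' : xs.Nodup := (List.nodup_cons.mp h).2
    by_cases hm : x ∈ acc
    · have hc : acc.contains x = true := by simpa using hm
      simp only [List.foldl_cons, PySem.Set.add, PySem.Set.contains, hc, List.filter_cons,
        Bool.not_true, if_pos]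
      simpa using ih acc h'
    · have hc : acc.contains x = false := by simpa using hm
      simp only [List.foldl_cons, PySem.Set.add, PySem.Set.contains, hc, List.filter_cons,
        Bool.not_false, if_false, Bool.false_eq_true]
      rw [ih (acc ++ [x]) h']
      have : xs.filter (fun t => !(acc ++ [x]).contains t) = xs.filter (fun t => !acc.contains t) := by
        apply List.filter_congr
        intro t ht
        have : t ≠ x := fun e => hx (e ▸ ht)
        simp [this]
      rw [this]; simp
  
-- first-match index facts
theorem pv_fi_getElem (L : List String) (t : String) (k : Nat) (hk : k < L.length)
    (hfi : pvFi L t = k) : PySem.Str.isIn t (L[k]'hk) = true := by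
  subst hfi
  exact List.findIdx_getElem

theorem pv_fi_not (L : List String) (t : String) (k : Nat) (hk : k < L.length)
    (h : k < pvFi L t) : PySem.Str.isIn t (L[k]'hk) = false := by
  unfold pvFi at h
  exact List.not_of_lt_findIdx h

theorem pv_fi_lt_iff (L : List String) (t : String) :
    pvFi L t < L.length ↔ pvP L t = true := by
  unfold pvFi pvP
  rw [List.findIdx_lt_length, List.any_eq_true]

-- loop invariant: folding the remaining blocks appends the canonical tail
theorem pv_inv (L : List String) (rest : List String) :
    ∀ (k : Nat) (acc : List String), rest = L.drop k →
    (∀ t, t ∈ acc ↔ t ∈ pvToolsConst ∧ pvFi L t < k) →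
    rest.foldl
      (fun a s => (pvToolsConst.filter (fun t => PySem.Str.isIn t s)).foldl PySem.Set.add a)
      acc
    = acc ++ pvCanon L rest.length k := by
  induction rest with
  | nil => intro k acc _ _; simp [pvCanon]
  | cons s rest ih =>
    intro k acc hrest hacc
    have hk : k < L.length := by
      by_contra hk
      have : L.drop k = [] := List.drop_eq_nil_of_le (by omega)
      rw [this] at hrest; simp at hrest
    have hs : L[k] = s := by
      have h0 : (L.drop k)[0]'(by rw [← hrest]; simp) = s := by
        simp [← hrest]
      simpa using h0
    have hrest' : rest = L.drop (k+1) := by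
      have : (L.drop k).drop 1 = L.drop (k+1) := by
        rw [List.drop_drop]
      rw [← this, ← hrest]; simp
    have hblock : (pvToolsConst.filter (fun t => PySem.Str.isIn t s)).filter
        (fun t => !acc.contains t) = pvToolsConst.filter (fun t => pvFi L t == k) := by
      rw [List.filter_filter]
      apply List.filter_congr
      intro t ht
      by_cases hfi : pvFi L t = k
      · have hin : PySem.Str.isIn t s = true := by
          have := pv_fi_getElem L t k hk hfi
          rw [hs] at this; exact this
        have hin' : PySem.Chars.isIn t.toList s.toList = true := by simpa using hin
        have hnm : t ∉ acc := by
          intro hmem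
          have := (hacc t).mp hmem
          omega
        have hc : acc.contains t = false := by simpa using hnm
        simp [hin', hfi, hnm]
      · by_cases hin : PySem.Str.isIn t s = true
        · have hle : pvFi L t ≤ k := by
            by_contra hgt
            have := pv_fi_not L t k hk (by omega)
            rw [hs] at this
            rw [hin] at this
            simp at this
          have hm : t ∈ acc := (hacc t).mpr ⟨ht, by omega⟩
          have hc : acc.contains t = true := by simpa using hm
          simp [hm, hfi]
        · have hin' : PySem.Chars.isIn t.toList s.toList = false := by
            simpa using hin
          simp [hin', hfi]
    have hnd : (pvToolsConst.filter (fun t => PySem.Str.isIn t s)).Nodup :=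
      pvTools_nodup.filter _
    have hstep : (pvToolsConst.filter (fun t => PySem.Str.isIn t s)).foldl PySem.Set.add acc
        = acc ++ pvToolsConst.filter (fun t => pvFi L t == k) := by
      rw [pv_foldl_add_nodup _ acc hnd, hblock]
    have hacc' : ∀ t, t ∈ acc ++ pvToolsConst.filter (fun t => pvFi L t == k) ↔
        t ∈ pvToolsConst ∧ pvFi L t < k + 1 := by
      intro t
      simp only [List.mem_append, List.mem_filter, hacc, beq_iff_eq]
      constructor
      · rintro (⟨h1, h2⟩ | ⟨h1, h2⟩) <;> exact ⟨h1, by omega⟩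
      · rintro ⟨h1, h2⟩
        by_cases hfi : pvFi L t = k
        · exact Or.inr ⟨h1, hfi⟩
        · exact Or.inl ⟨h1, by omega⟩
    calc (s :: rest).foldl _ acc
        = rest.foldl _ (acc ++ pvToolsConst.filter (fun t => pvFi L t == k)) := by
          simp only [List.foldl_cons, hstep]
      _ = acc ++ pvToolsConst.filter (fun t => pvFi L t == k) ++ pvCanon L rest.length (k+1) :=
          ih (k+1) _ hrest' hacc'
      _ = acc ++ pvCanon L (s :: rest).length k := by
          simp [pvCanon, List.append_assoc]

-- A computes the canonical list
theorem pv_A_canon (steps : List String) :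
    get_tools steps = pvCanon (steps.map PySem.Str.lower) (steps.map PySem.Str.lower).length 0 := by
  rw [pv_A_fold]
  have := pv_inv (steps.map PySem.Str.lower) (steps.map PySem.Str.lower) 0 []
    (by simp) (by simp)
  simpa using this

-- ---- B side ----

-- the helper scan over enumerate is findIdx
theorem pv_firstMatch (t : String) (L : List String) :
    ∀ (s : Int), pvFirstMatch t (PySem.List.enumerate L s)
      = if pvP L t then some (s + (pvFi L t : Int)) else none := by
  induction L with
  | nil => intro s; simp [PySem.List.enumerate_nil, pvFirstMatch, pvP]
  | cons x L ih =>
    intro s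
    rw [PySem.List.enumerate_cons]
    cases hx : PySem.Str.isIn t x with
    | true =>
      have hx' : PySem.Chars.isIn t.toList x.toList = true := by simpa using hx
      simp [pvFirstMatch, pvP, pvFi, List.findIdx_cons, hx']
    | false =>
      have hx' : PySem.Chars.isIn t.toList x.toList = false := by simpa using hx
      simp only [pvFirstMatch, hx, Bool.false_eq_true, if_false, ih (s+1), pvP, pvFi,
        List.findIdx_cons, List.any_cons]
      simp only [Bool.false_or, cond_false]
      split_ifs with h
      · congr 1; push_cast; ring
      · rfl

-- filtered-mapped enumerate over a duplicate-free list, via idxOf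
theorem pv_enum_map {β : Type} (pb : String → Bool) (g : Int → String → β) :
    ∀ (ts : List String) (s : Int), ts.Nodup →
    ((PySem.List.enumerate ts s).filter (fun q => pb q.2)).map (fun q => g q.1 q.2)
    = (ts.filter pb).map (fun t => g (s + (ts.idxOf t : Int)) t) := by
  intro ts
  induction ts with
  | nil => intro s _; simp [PySem.List.enumerate_nil]
  | cons t ts ih =>
    intro s hnd
    have ht : t ∉ ts := (List.nodup_cons.mp hnd).1
    have h' : ts.Nodup := (List.nodup_cons.mp hnd).2
    rw [PySem.List.enumerate_cons]
    have htail : ∀ (u : String), u ∈ ts.filter pb →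
        g (s + 1 + ((ts.idxOf u : Nat) : Int)) u = g (s + ((t :: ts).idxOf u : Int)) u := by
      intro u hu
      have hu' : u ∈ ts := (List.mem_filter.mp hu).1
      have hne : (t == u) = false := by
        have : t ≠ u := fun e => ht (e ▸ hu')
        simpa using this
      rw [List.idxOf_cons, hne]
      simp only [cond_false]
      congr 1
      push_cast; ring
    by_cases hp : pb t
    · simp only [List.filter_cons, hp, if_pos, List.map_cons, ih (s+1) h']
      rw [List.idxOf_cons_self]
      congr 1
      · simp
      · exact List.map_congr_left htail
    · simp only [List.filter_cons, hp, Bool.false_eq_true, if_false, ih (s+1) h']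
      exact List.map_congr_left htail

-- B's keyed list in closed form
theorem pv_keyed (steps : List String) :
    (PySem.List.enumerate pvToolsConst).foldl
      (fun acc q =>
        match pvFirstMatch q.2 (PySem.List.enumerate (steps.map PySem.Str.lower)) with
        | some si => acc ++ [(si * PySem.List.len pvToolsConst + q.1, q.2)]
        | none => acc) []
    = (pvToolsConst.filter (pvP (steps.map PySem.Str.lower))).map
        (pvKeyF (steps.map PySem.Str.lower)) := by
  set L := steps.map PySem.Str.lower with hL
  have hlen : PySem.List.len pvToolsConst = 30 := rfl
  have hbody : ∀ (acc : List (Int × String)) (q : Int × String),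
      q ∈ PySem.List.enumerate pvToolsConst →
      (match pvFirstMatch q.2 (PySem.List.enumerate L) with
        | some si => acc ++ [(si * PySem.List.len pvToolsConst + q.1, q.2)]
        | none => acc)
      = (if pvP L q.2 then acc ++ [((pvFi L q.2 : Int) * 30 + q.1, q.2)] else acc) := by
    intro acc q _
    rw [pv_firstMatch q.2 L 0]
    by_cases h : pvP L q.2
    · rw [if_pos h, if_pos h]
      have h30 : ((pvToolsConst.length : Nat) : Int) = 30 := rfl
      simp [PySem.List.len_eq, h30]
    · rw [if_neg (by simp [h]), if_neg (by simp [h])]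
  have h1 : (PySem.List.enumerate pvToolsConst).foldl
      (fun acc q =>
        match pvFirstMatch q.2 (PySem.List.enumerate L) with
        | some si => acc ++ [(si * PySem.List.len pvToolsConst + q.1, q.2)]
        | none => acc) []
      = (PySem.List.enumerate pvToolsConst).foldl
        (fun acc q => if pvP L q.2 then acc ++ [((pvFi L q.2 : Int) * 30 + q.1, q.2)] else acc)
        [] :=
    PySem.List.foldl_congr_mem _ _ _ [] hbody
  rw [h1, PySem.List.foldl_append_if (p := fun q => pvP L q.2)
      (f := fun q : Int × String => ((pvFi L q.2 : Int) * 30 + q.1, q.2))]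
  rw [pv_enum_map (pvP L) (fun ti t => ((pvFi L t : Int) * 30 + ti, t)) pvToolsConst 0
    pvTools_nodup]
  simp [pvKeyF]

-- membership in the canonical list
theorem pv_canon_mem (L : List String) :
    ∀ (n k : Nat) (t : String), t ∈ pvCanon L n k ↔
      t ∈ pvToolsConst ∧ k ≤ pvFi L t ∧ pvFi L t < k + n := by
  intro n
  induction n with
  | zero =>
    intro k t
    simp only [pvCanon, List.not_mem_nil, false_iff]
    rintro ⟨_, h2, h3⟩
    omega
  | succ n ih =>
    intro k t
    simp only [pvCanon, List.mem_append, List.mem_filter, beq_iff_eq, ih (k+1)]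
    constructor
    · rintro (⟨h1, h2⟩ | ⟨h1, h2, h3⟩) <;> exact ⟨h1, by omega, by omega⟩
    · rintro ⟨h1, h2, h3⟩
      by_cases hfi : pvFi L t = k
      · exact Or.inl ⟨h1, hfi⟩
      · exact Or.inr ⟨h1, by omega, by omega⟩

-- nodup tools list has strictly increasing idxOf along it
theorem pv_idx_pairwise : pvToolsConst.Pairwise (fun u v => pvToolsConst.idxOf u < pvToolsConst.idxOf v) := by
  rw [List.pairwise_iff_getElem]
  intro i j hi hj hij
  rw [List.Nodup.idxOf_getElem pvTools_nodup i hi, List.Nodup.idxOf_getElem pvTools_nodup j hj]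
  exact hij

-- the canonical list is strictly increasing in the combined rank
theorem pv_canon_pairwise (L : List String) :
    ∀ (n k : Nat), (pvCanon L n k).Pairwise (fun u v => pvKeyN L u < pvKeyN L v) := by
  intro n
  induction n with
  | zero => intro k; simp [pvCanon]
  | succ n ih =>
    intro k
    rw [pvCanon, List.pairwise_append]
    refine ⟨?_, ih (k+1), ?_⟩
    · have hsub := (List.filter_sublist (p := fun t => pvFi L t == k) (l := pvToolsConst))
      have hpw := List.Pairwise.sublist hsub pv_idx_pairwise
      apply hpw.imp_of_mem
      intro u v hu hv hlt
      have hu' := List.mem_filter.mp hu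
      have hv' := List.mem_filter.mp hv
      have h1 : pvFi L u = k := by simpa using hu'.2
      have h2 : pvFi L v = k := by simpa using hv'.2
      unfold pvKeyN
      omega
    · intro u hu v hv
      have hu' := List.mem_filter.mp hu
      have h1 : pvFi L u = k := by simpa using hu'.2
      have h2 := (pv_canon_mem L n (k+1) v).mp hv
      have hidx : pvToolsConst.idxOf u < 30 := by
        rw [← pvTools_len]
        exact List.idxOf_lt_length_of_mem hu'.1
      unfold pvKeyN
      omega

-- permutation of canon against the filtered tools list
theorem pv_canon_perm (L : List String) :
    (pvCanon L L.length 0).Perm (pvToolsConst.filter (pvP L)) := by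
  have hnd1 : (pvCanon L L.length 0).Nodup := by
    have := pv_canon_pairwise L L.length 0
    exact this.imp (fun {u v} h e => by rw [e] at h; exact lt_irrefl _ h)
  have hnd2 : (pvToolsConst.filter (pvP L)).Nodup := pvTools_nodup.filter _
  rw [List.perm_ext_iff_of_nodup hnd1 hnd2]
  intro t
  rw [pv_canon_mem, List.mem_filter]
  constructor
  · rintro ⟨h1, _, h3⟩
    exact ⟨h1, (pv_fi_lt_iff L t).mp (by omega)⟩
  · rintro ⟨h1, h2⟩
    have := (pv_fi_lt_iff L t).mpr h2
    exact ⟨h1, by omega, by omega⟩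

-- ===== VERDICT helper: the full equality =====
theorem pv_equal (steps : List String) : get_tools steps = get_tools_alt steps := by
  rw [pv_A_canon]
  simp only [get_tools_alt]
  rw [pv_keyed]
  have hperm : ((pvCanon (steps.map PySem.Str.lower) (steps.map PySem.Str.lower).length 0).map
        (pvKeyF (steps.map PySem.Str.lower))).Perm
      ((pvToolsConst.filter (pvP (steps.map PySem.Str.lower))).map
        (pvKeyF (steps.map PySem.Str.lower))) :=
    (pv_canon_perm (steps.map PySem.Str.lower)).map _
  have hpw : ((pvCanon (steps.map PySem.Str.lower) (steps.map PySem.Str.lower).length 0).map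
      (pvKeyF (steps.map PySem.Str.lower))).Pairwise (fun a b => a.1 < b.1) := by
    rw [List.pairwise_map]
    apply (pv_canon_pairwise (steps.map PySem.Str.lower) _ 0).imp_of_mem
    intro u v hu hv hlt
    have hu30 : pvToolsConst.idxOf u < 30 := by
      rw [← pvTools_len]
      exact List.idxOf_lt_length_of_mem ((pv_canon_mem _ _ _ u).mp hu).1
    have hv30 : pvToolsConst.idxOf v < 30 := by
      rw [← pvTools_len]
      exact List.idxOf_lt_length_of_mem ((pv_canon_mem _ _ _ v).mp hv).1
    unfold pvKeyN at hlt
    unfold pvKeyF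
    simp only
    omega
  have hsorted := PySem.List.sorted_eq_of_perm_of_pairwise_lt
    ((pvToolsConst.filter (pvP (steps.map PySem.Str.lower))).map
      (pvKeyF (steps.map PySem.Str.lower)))
    ((pvCanon (steps.map PySem.Str.lower) (steps.map PySem.Str.lower).length 0).map
      (pvKeyF (steps.map PySem.Str.lower)))
    (fun kv => kv.1) hperm hpw
  have hfinal : ((pvCanon (steps.map PySem.Str.lower) (steps.map PySem.Str.lower).length 0).map
      (pvKeyF (steps.map PySem.Str.lower))).map (fun kv => kv.2)
      = pvCanon (steps.map PySem.Str.lower) (steps.map PySem.Str.lower).length 0 := by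
    rw [List.map_map]
    exact (List.map_congr_left (g := fun x => x) (fun x _ => rfl)).trans (List.map_id _)
  exact (hfinal.symm.trans (congrArg (List.map (fun kv => kv.2)) hsorted.symm))

-- ===== VERDICT (by name: the statement is the Claim_ definition above) =====
theorem get_tools_spec : Claim_equal_get_tools := by
  intro steps _
  unfold Spec_get_tools
  exact pv_equal steps
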